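-- pv_equiv track=rewrite | github.com/Turbo87/aerofiles | aerofiles/aixm/AixmOpenairConverter.py | abbreviate_weekdays
-- ===== SOURCE A (Python) =====
-- def abbreviate_weekdays(days_string):
--     """
--     Erzeugt eine abgekürzte Schreibweise für sortierte Wochentage.
--
--     Args:
--     days_string (str): String mit sortierten Wochentagen (MON, TUE, WED, THU, FRI, SAT, SUN)
--
--     Returns:
--     str: Abgekürzte Schreibweise (z.B. "MON-SUN", "TUE-FRI", "MON-WED,FRI-SUN")
--     """
--     # Wochentage in der richtigen Reihenfolge
--     weekdays = ["MON", "TUE", "WED", "THU", "FRI", "SAT", "SUN"]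
--
--     # Extrahiere die vorhandenen Tage aus dem String
--     present_days = []
--     for day in weekdays:
--         if day in days_string:
--             present_days.append(day)
--
--     if not present_days:
--         return ""
--
--     # Finde zusammenhängende Bereiche
--     ranges = []
--     start = 0
--
--     while start < len(present_days):
--         end = start
--
--         # Finde das Ende des aktuellen Bereichs
--         while (end + 1 < len(present_days) and
--                weekdays.index(present_days[end + 1]) == weekdays.index(present_days[end]) + 1):
--             end += 1
--
--         # Füge den Bereich hinzu
--         if start == end:
--             # Einzelner Tag
--             ranges.append(present_days[start])
--         else:
--             # Bereich von start bis end
--             ranges.append(f"{present_days[start]}-{present_days[end]}")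
--
--         start = end + 1
--
--     return ",".join(ranges)
-- ===== SOURCE B (Python) =====
-- WEEKDAYS = ["MON", "TUE", "WED", "THU", "FRI", "SAT", "SUN"]
--
--
-- def abbreviate_weekdays(days_string):
--     # 7-bit presence mask; a range starts/ends at bit-pattern boundaries of the mask.
--     mask = sum(1 << i for i, d in enumerate(WEEKDAYS) if d in days_string)
--     starts = [i for i in range(7) if mask >> i & 1 and not (mask >> (i - 1) & 1 if i else 0)]
--     ends = [i for i in range(7) if mask >> i & 1 and not mask >> (i + 1) & 1]
--     return ",".join(WEEKDAYS[s] if s == e else f"{WEEKDAYS[s]}-{WEEKDAYS[e]}"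
--                     for s, e in zip(starts, ends))
-- ===== Notes on version B (the rewrite author's own statement) =====
-- stated objective: alternative
-- what changed: A builds the list of present day names and groups consecutive runs with a nested scan-to-end while loop using repeated weekdays.index calls; B encodes presence as a 7-bit mask and reads the ranges off as bit-pattern boundaries (a start is a set bit whose predecessor bit is clear, an end a set bit whose successor bit is clear), zipping starts with ends -- no run-tracking loop at all.
import Mathlib
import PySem

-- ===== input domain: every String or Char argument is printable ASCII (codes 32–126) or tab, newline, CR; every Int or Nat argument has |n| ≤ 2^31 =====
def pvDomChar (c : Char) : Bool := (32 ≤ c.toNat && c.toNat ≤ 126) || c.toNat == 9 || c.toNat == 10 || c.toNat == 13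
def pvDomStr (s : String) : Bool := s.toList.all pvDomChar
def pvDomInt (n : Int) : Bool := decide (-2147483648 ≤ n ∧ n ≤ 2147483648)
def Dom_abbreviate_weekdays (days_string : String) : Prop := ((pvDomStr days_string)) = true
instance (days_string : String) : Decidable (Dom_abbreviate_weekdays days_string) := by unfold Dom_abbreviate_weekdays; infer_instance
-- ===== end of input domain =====

-- B replaces A's run-tracking nested while loops by a bitmask boundary reading: presence
-- becomes a 7-bit mask and ranges are the zipped start/end bit boundaries (objective: alternative).

-- ===== PORT A =====
def pvWeekdays : List String := ["MON", "TUE", "WED", "THU", "FRI", "SAT", "SUN"]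

-- weekdays.index(d); every element of present_days is in weekdays, so the default is never taken
def pvIdxA (d : String) : Nat := (PySem.List.index? pvWeekdays d).getD 0

-- inner while loop of A; fuel = present.length suffices since ed strictly increases
def pvFindEnd (present : List String) : Nat → Nat → Nat
  | 0, ed => ed
  | fuel + 1, ed =>
    if ed + 1 < present.length &&
       (pvIdxA (present.getD (ed + 1) "") == pvIdxA (present.getD ed "") + 1) then
      pvFindEnd present fuel (ed + 1)
    else ed

-- outer while loop of A; fuel = present.length suffices since start strictly increases
def pvOuter (present : List String) : Nat → Nat → List String → List String
  | 0, _, ranges => ranges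
  | fuel + 1, start, ranges =>
    if start < present.length then
      let ed := pvFindEnd present present.length start
      let ranges' :=
        if start == ed then ranges ++ [present.getD start ""]
        else ranges ++ [present.getD start "" ++ "-" ++ present.getD ed ""]
      pvOuter present fuel (ed + 1) ranges'
    else ranges

def abbreviate_weekdays (days_string : String) : String :=
  let present := pvWeekdays.foldl
    (fun acc day => if PySem.Str.isIn day days_string then acc ++ [day] else acc) []
  if present.isEmpty then ""
  else PySem.Str.join "," (pvOuter present present.length 0 [])

-- ===== PORT B =====
-- mask >> i & 1 (Python truthiness of a 0/1 int)
def pvBit (mask i : Nat) : Bool := (mask >>> i) % 2 == 1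

def abbreviate_weekdays_alt (days_string : String) : String :=
  let mask : Nat := ((PySem.List.enumerate pvWeekdays 0).filter
      (fun p => PySem.Str.isIn p.2 days_string)).foldl (fun acc p => acc + (1 <<< p.1.toNat)) 0
  let starts := (List.range 7).filter
    (fun i => pvBit mask i && !(if i ≠ 0 then pvBit mask (i - 1) else false))
  let ends := (List.range 7).filter (fun i => pvBit mask i && !pvBit mask (i + 1))
  PySem.Str.join "," ((starts.zip ends).map (fun p =>
    if p.1 == p.2 then pvWeekdays.getD p.1 ""
    else pvWeekdays.getD p.1 "" ++ "-" ++ pvWeekdays.getD p.2 ""))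

-- ===== PRECONDITION & SPEC =====
def Spec_abbreviate_weekdays (days_string : String) (out : String) : Prop := out = abbreviate_weekdays_alt days_string
instance (days_string : String) (out : String) : Decidable (Spec_abbreviate_weekdays days_string out) := by unfold Spec_abbreviate_weekdays; infer_instance

-- ===== CLAIM (what is proved, stated in full; the proofs are below) =====
def Claim_equal_abbreviate_weekdays : Prop := ∀ (days_string : String), Dom_abbreviate_weekdays days_string → Spec_abbreviate_weekdays days_string (abbreviate_weekdays days_string)

-- ===== LEMMAS AND PROOFS =====

-- ===== VERDICT (by name: the statement is the Claim_ definition above) =====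
theorem abbreviate_weekdays_spec : Claim_equal_abbreviate_weekdays := by
  intro s _
  unfold Spec_abbreviate_weekdays abbreviate_weekdays abbreviate_weekdays_alt
  simp only [pvWeekdays, List.foldl, PySem.List.enumerate_cons,
    PySem.List.enumerate_nil, List.filter_cons, List.filter_nil]
  generalize PySem.Str.isIn "MON" s = b0
  generalize PySem.Str.isIn "TUE" s = b1
  generalize PySem.Str.isIn "WED" s = b2
  generalize PySem.Str.isIn "THU" s = b3
  generalize PySem.Str.isIn "FRI" s = b4
  generalize PySem.Str.isIn "SAT" s = b5
  generalize PySem.Str.isIn "SUN" s = b6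
  revert b0 b1 b2 b3 b4 b5 b6
  decide
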